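-- pv_equiv track=rewrite | github.com/Mashtic/tareaProgramada1 | funciones.py | crearContadorAstro
-- ===== SOURCE A (Python) =====
-- def crearContadorAstro(pVisitantes):
--     """
--     Funcionalidad: crea una matriz con listas con el código del astrónomos que tienen
--                    fans y un número 0 que sirve de contador
--     Entradas: pVisitante (list)
--     Salidas: contAstros (list)
--     """
--     contAstros = []
--     for visitante in pVisitantes:
--         for codAstro in visitante[2]:
--             astroCant = [codAstro, 0]
--             if astroCant not in contAstros: # Si ya existe, no se agrega
--                 contAstros.append(astroCant)
--     return contAstros
-- ===== SOURCE B (Python) =====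
-- def crearContadorAstro(pVisitantes):
--     # nub-by-deletion: repeatedly take the first remaining code and delete
--     # all of its later occurrences by filtering; no membership tests at all.
--     codes = [c for v in pVisitantes for c in v[2]]
--     contAstros = []
--     while codes:
--         head = codes[0]
--         contAstros.append([head, 0])
--         codes = [c for c in codes[1:] if c != head]
--     return contAstros
-- ===== Notes on version B (the rewrite author's own statement) =====
-- stated objective: alternative
-- what changed: Replaces A's accumulate-and-membership-scan loop with nub-by-deletion: flatten all codes, then repeatedly emit the first remaining code and filter all its later occurrences out of the remainder, so no membership test or seen-structure exists at all.
import Mathlib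
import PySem

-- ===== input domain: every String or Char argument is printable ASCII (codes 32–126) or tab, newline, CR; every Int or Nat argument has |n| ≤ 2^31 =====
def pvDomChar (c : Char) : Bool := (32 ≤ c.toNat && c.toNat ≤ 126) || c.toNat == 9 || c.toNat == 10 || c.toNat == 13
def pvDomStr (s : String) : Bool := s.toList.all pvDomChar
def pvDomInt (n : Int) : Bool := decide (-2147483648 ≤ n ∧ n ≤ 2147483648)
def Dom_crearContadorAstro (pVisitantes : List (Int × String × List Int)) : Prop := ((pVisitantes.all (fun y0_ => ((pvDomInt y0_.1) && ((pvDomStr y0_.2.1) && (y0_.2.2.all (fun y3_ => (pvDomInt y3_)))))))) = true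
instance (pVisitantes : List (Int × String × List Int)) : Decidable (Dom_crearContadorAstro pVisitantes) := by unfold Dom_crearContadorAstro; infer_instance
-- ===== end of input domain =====

-- B is an alternative algorithm (nub-by-deletion: repeatedly emit the first remaining
-- code and filter out its later occurrences) with no membership test or seen-structure.

-- ===== PORT A =====
-- literal port: nested loop appending [codAstro, 0] when not already present
def crearContadorAstro (pVisitantes : List (Int × String × List Int)) : List (List Int) :=
  pVisitantes.foldl
    (fun contAstros visitante =>
      visitante.2.2.foldl
        (fun contAstros codAstro =>
          let astroCant : List Int := [codAstro, 0]
          if contAstros.contains astroCant then contAstros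
          else contAstros ++ [astroCant])
        contAstros)
    []

-- ===== PORT B =====
-- Source B's while loop: take the head, append [head, 0], filter head out of the tail
def nubPairs (codes : List Int) : List (List Int) :=
  match codes with
  | [] => []
  | head :: rest => [head, 0] :: nubPairs (rest.filter (fun c => c != head))
termination_by codes.length
decreasing_by
  simpa using Nat.lt_succ_of_le (List.length_filter_le _ _)

def crearContadorAstro_alt (pVisitantes : List (Int × String × List Int)) : List (List Int) :=
  let codes := pVisitantes.flatMap (fun v => v.2.2)
  nubPairs codes

-- ===== PRECONDITION & SPEC =====
def Spec_crearContadorAstro (pVisitantes : List (Int × String × List Int)) (out : List (List Int)) : Prop := out = crearContadorAstro_alt pVisitantes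
instance (pVisitantes : List (Int × String × List Int)) (out : List (List Int)) : Decidable (Spec_crearContadorAstro pVisitantes out) := by unfold Spec_crearContadorAstro; infer_instance

-- ===== CLAIM (what is proved, stated in full; the proofs are below) =====
def Claim_equal_crearContadorAstro : Prop := ∀ (pVisitantes : List (Int × String × List Int)), Dom_crearContadorAstro pVisitantes → Spec_crearContadorAstro pVisitantes (crearContadorAstro pVisitantes)

-- ===== LEMMAS AND PROOFS =====

-- A's inner step on a mapped accumulator is Set.add on the codes, mapped
theorem foldl_step_map (cs : List Int) (s : List Int) :
    cs.foldl
      (fun contAstros codAstro =>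
        let astroCant : List Int := [codAstro, 0]
        if contAstros.contains astroCant then contAstros
        else contAstros ++ [astroCant])
      (s.map (fun code => [code, 0]))
    = (cs.foldl PySem.Set.add s).map (fun code => [code, 0]) := by
  induction cs generalizing s with
  | nil => rfl
  | cons c cs ih =>
    simp only [List.foldl_cons]
    have hmem : (s.map (fun code => [code, 0])).contains ([c, 0] : List Int) = s.contains c := by
      simp
    show List.foldl _ (if (s.map (fun code => [code, 0])).contains ([c, 0] : List Int) = true then _ else _) cs = _
    rw [hmem, PySem.Set.add_eq_ite]
    by_cases h : c ∈ s
    · rw [if_pos (by simpa using h), if_pos h]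
      exact ih s
    · rw [if_neg (by simpa using h), if_neg h]
      have hm : (s.map (fun code => [code, 0])) ++ [([c, 0] : List Int)]
          = (s ++ [c]).map (fun code => [code, 0]) := by simp
      rw [hm]
      exact ih (s ++ [c])

-- the whole of A is the Set.add fold over the flattened codes, mapped
theorem crearContadorAstro_eq_fold (pVisitantes : List (Int × String × List Int)) :
    crearContadorAstro pVisitantes
      = ((pVisitantes.flatMap (fun v => v.2.2)).foldl PySem.Set.add []).map
          (fun code => [code, 0]) := by
  unfold crearContadorAstro
  rw [List.foldl_flatMap]
  have : ∀ (vs : List (Int × String × List Int)) (s : List Int),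
      vs.foldl
        (fun contAstros visitante =>
          visitante.2.2.foldl
            (fun contAstros codAstro =>
              let astroCant : List Int := [codAstro, 0]
              if contAstros.contains astroCant then contAstros
              else contAstros ++ [astroCant])
            contAstros)
        (s.map (fun code => [code, 0]))
      = (vs.foldl (fun s v => v.2.2.foldl PySem.Set.add s) s).map (fun code => [code, 0]) := by
    intro vs
    induction vs with
    | nil => intro s; rfl
    | cons v vs ih =>
      intro s
      simp only [List.foldl_cons]
      rw [foldl_step_map, ih]
  simpa using this pVisitantes []

-- pulling an already-seen head out of the accumulator commutes with filtering it out
theorem foldl_add_cons (cs : List Int) (s : List Int) (c : Int) :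
    cs.foldl PySem.Set.add (c :: s)
      = c :: (cs.filter (fun x => x != c)).foldl PySem.Set.add s := by
  induction cs generalizing s with
  | nil => rfl
  | cons x cs ih =>
    by_cases hx : x = c
    · subst hx
      have h1 : PySem.Set.add (x :: s) x = x :: s := by
        simp
      simp only [List.foldl_cons, List.filter_cons, h1]
      simpa using ih s
    · have h1 : PySem.Set.add (c :: s) x = c :: PySem.Set.add s x := by
        simp only [PySem.Set.add_eq_ite, List.mem_cons]
        by_cases hs : x ∈ s
        · rw [if_pos (Or.inr hs), if_pos hs]
        · rw [if_neg (by tauto), if_neg hs]; rfl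
      simp only [List.foldl_cons, List.filter_cons]
      rw [if_pos (by simp [hx]), List.foldl_cons, h1, ih]

-- the Set.add dedup fold, mapped to pairs, is exactly B's nub-by-deletion loop
theorem fold_map_eq_nubPairs (cs : List Int) :
    (cs.foldl PySem.Set.add []).map (fun code => [code, 0]) = nubPairs cs := by
  induction hn : cs.length using Nat.strong_induction_on generalizing cs with
  | _ n ih =>
    match cs, hn with
    | [], _ => simp [nubPairs]
    | c :: rest, hn =>
      have hstep : PySem.Set.add ([] : List Int) c = [c] := by
        simp
      rw [nubPairs, List.foldl_cons, hstep,
        show ([c] : List Int) = c :: [] from rfl, foldl_add_cons]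
      have hlt : (rest.filter (fun x => x != c)).length < n := by
        subst hn
        simpa using Nat.lt_succ_of_le (List.length_filter_le _ _)
      rw [List.map_cons, ih _ hlt _ rfl]

-- ===== VERDICT (by name: the statement is the Claim_ definition above) =====
theorem crearContadorAstro_spec : Claim_equal_crearContadorAstro := by
  intro pVisitantes _
  unfold Spec_crearContadorAstro crearContadorAstro_alt
  rw [crearContadorAstro_eq_fold, fold_map_eq_nubPairs]
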